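-- pv_equiv track=rewrite | github.com/verlab/sl_sentence_segmentation | st-gcn/get_model_results.py | get_number_of_segments
-- ===== SOURCE A (Python) =====
-- def get_number_of_segments(labels):
--     count_segments = 0
--     segment_sizes = []
--
--     last_frame = 1
--     for i in range(len(labels)):
--         # start of a new segment: add to count and start measuring size
--         if labels[i] == 0 and last_frame == 1:
--             count_segments += 1
--             last_frame = 0
--             curr_segment_size = 1
--         # continuing of a segment: add to size measuring
--         elif labels[i] == 0 and last_frame == 0:
--             curr_segment_size += 1
--         # end of a segment: append to list of sizes
--         elif labels[i] == 1 and last_frame == 0: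
--             last_frame = 1
--             segment_sizes.append(curr_segment_size)
--             curr_segment_size = 0
--
--     return count_segments, segment_sizes
-- ===== SOURCE B (Python) =====
-- def get_number_of_segments(labels):
--     # Keep only binary labels (A's state machine ignores any other value),
--     # run-length encode them, then read the answer off the groups:
--     # every zero-run is a counted segment; its size is recorded unless it is
--     # the final group (an unterminated trailing segment has no recorded size).
--     groups = []
--     for x in labels:
--         if x == 0 or x == 1:
--             if groups and groups[-1][0] == x:
--                 groups[-1][1] += 1
--             else:
--                 groups.append([x, 1])
--     count = sum(1 for k, _ in groups if k == 0)
--     sizes = [n for k, n in groups[:-1] if k == 0]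
--     return count, sizes
-- ===== Notes on version B (the rewrite author's own statement) =====
-- stated objective: alternative
-- what changed: B run-length-encodes the binary labels (ignoring non-0/1 values as A does) and derives the count from the zero-run groups and the sizes from all zero-runs except the final group, instead of A's one-pass last_frame state machine.
import Mathlib
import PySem

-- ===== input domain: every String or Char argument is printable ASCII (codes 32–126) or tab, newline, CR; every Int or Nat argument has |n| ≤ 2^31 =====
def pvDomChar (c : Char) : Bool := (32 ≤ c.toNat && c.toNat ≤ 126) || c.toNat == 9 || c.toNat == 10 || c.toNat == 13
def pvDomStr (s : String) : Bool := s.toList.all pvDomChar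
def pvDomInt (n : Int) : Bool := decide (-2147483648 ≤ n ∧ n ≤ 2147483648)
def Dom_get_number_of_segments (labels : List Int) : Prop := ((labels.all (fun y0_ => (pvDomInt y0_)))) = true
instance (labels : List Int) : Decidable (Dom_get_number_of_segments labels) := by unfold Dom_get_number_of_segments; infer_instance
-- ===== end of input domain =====

-- B replaces A's one-pass last_frame state machine by a run-length encoding of the
-- binary labels from which count and sizes are read off (objective: alternative).

-- ===== PORT A =====
-- state = (count_segments, segment_sizes, last_frame, curr_segment_size);
-- curr_segment_size starts as 0 (Python leaves it unbound, but it is only read after being set)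
def pvStepA (st : Int × List Int × Int × Int) (x : Int) : Int × List Int × Int × Int :=
  let (c, sizes, lf, cur) := st
  if x == 0 && lf == 1 then (c + 1, sizes, 0, 1)
  else if x == 0 && lf == 0 then (c, sizes, lf, cur + 1)
  else if x == 1 && lf == 0 then (c, sizes ++ [cur], 1, 0)
  else st

def get_number_of_segments (labels : List Int) : Int × List Int :=
  let st := labels.foldl pvStepA (0, [], 1, 0)
  (st.1, st.2.1)

-- ===== PORT B =====
-- run-length encoding step, groups kept in reverse order (head = most recent group)
def pvRleStep (gs : List (Int × Int)) (x : Int) : List (Int × Int) :=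
  match gs with
  | (k, n) :: rest => if k == x then (k, n + 1) :: rest else (x, 1) :: (k, n) :: rest
  | [] => [(x, 1)]

def get_number_of_segments_alt (labels : List Int) : Int × List Int :=
  let filtered := labels.filter (fun x => x == 0 || x == 1)
  let groups := (filtered.foldl pvRleStep []).reverse
  let count : Int := ((groups.filter (fun p => p.1 == 0)).length : Int)
  let sizes := (groups.dropLast.filter (fun p => p.1 == 0)).map Prod.snd
  (count, sizes)

-- ===== PRECONDITION & SPEC =====
def Spec_get_number_of_segments (labels : List Int) (out : Int × List Int) : Prop := out = get_number_of_segments_alt labels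
instance (labels : List Int) (out : Int × List Int) : Decidable (Spec_get_number_of_segments labels out) := by unfold Spec_get_number_of_segments; infer_instance

-- ===== CLAIM (what is proved, stated in full; the proofs are below) =====
def Claim_equal_get_number_of_segments : Prop := ∀ (labels : List Int), Dom_get_number_of_segments labels → Spec_get_number_of_segments labels (get_number_of_segments labels)

-- ===== LEMMAS AND PROOFS =====

-- invariant tying A's fold state to B's reversed group list for the processed prefix
def pvInv (st : Int × List Int × Int × Int) (gs : List (Int × Int)) : Prop :=
  st.1 = ((gs.filter (fun p => p.1 == 0)).length : Int) ∧
  ( (st.2.2.1 = 1 ∧ (∀ p ∈ gs.head?, p.1 = 1) ∧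
      st.2.1 = (((gs.filter (fun p => p.1 == 0)).map Prod.snd).reverse))
  ∨ (st.2.2.1 = 0 ∧ ∃ rest, gs = (0, st.2.2.2) :: rest ∧
      st.2.1 = (((rest.filter (fun p => p.1 == 0)).map Prod.snd).reverse)) )

theorem pvInv_step (st : Int × List Int × Int × Int) (gs : List (Int × Int)) (x : Int)
    (h : pvInv st gs) :
    pvInv (pvStepA st x)
      (if x == 0 || x == 1 then pvRleStep gs x else gs) := by
  obtain ⟨c, sizes, lf, cur⟩ := st
  obtain ⟨hc, hcase⟩ := h
  by_cases hx0 : x = 0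
  · subst hx0
    rcases hcase with ⟨hlf, hhd, hsz⟩ | ⟨hlf, rest, hgs, hsz⟩
    · -- lf = 1, new segment starts
      simp only at hlf hsz; subst hlf
      match gs, hhd with
      | [], _ =>
        refine ⟨?_, Or.inr ⟨rfl, [], rfl, ?_⟩⟩ <;> simp_all [pvStepA, pvRleStep]
      | (k, n) :: rest, hhd =>
        have hk : k = 1 := hhd (k, n) rfl
        subst hk
        refine ⟨?_, Or.inr ⟨rfl, (1, n) :: rest, ?_, ?_⟩⟩ <;>
          simp_all [pvStepA, pvRleStep]
    · -- lf = 0, segment continues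
      simp only at hlf hsz hgs; subst hlf; subst hgs
      refine ⟨?_, Or.inr ⟨rfl, rest, ?_, ?_⟩⟩ <;> simp_all [pvStepA, pvRleStep]
  · by_cases hx1 : x = 1
    · subst hx1
      rcases hcase with ⟨hlf, hhd, hsz⟩ | ⟨hlf, rest, hgs, hsz⟩
      · -- lf = 1 and x = 1: no-op for A, head grows or new 1-group for B
        simp only at hlf hsz; subst hlf
        match gs, hhd with
        | [], _ =>
          refine ⟨?_, Or.inl ⟨rfl, ?_, ?_⟩⟩ <;> simp_all [pvStepA, pvRleStep]
        | (k, n) :: rest, hhd =>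
          have hk : k = 1 := hhd (k, n) rfl
          subst hk
          refine ⟨?_, Or.inl ⟨rfl, ?_, ?_⟩⟩ <;> simp_all [pvStepA, pvRleStep]
      · -- lf = 0 and x = 1: segment closes
        simp only at hlf hsz hgs; subst hlf; subst hgs
        refine ⟨?_, Or.inl ⟨rfl, ?_, ?_⟩⟩ <;> simp_all [pvStepA, pvRleStep]
    · -- non-binary label: A's else branch, B filters it out
      have : (x == 0 || x == 1) = false := by simp [hx0, hx1]
      simp only [this, Bool.false_eq_true, if_false]
      have hA : pvStepA (c, sizes, lf, cur) x = (c, sizes, lf, cur) := by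
        simp [pvStepA, hx0, hx1]
      rw [hA]; exact ⟨hc, hcase⟩

theorem pvInv_foldl (labels : List Int) (st : Int × List Int × Int × Int)
    (gs : List (Int × Int)) (h : pvInv st gs) :
    pvInv (labels.foldl pvStepA st)
      ((labels.filter (fun x => x == 0 || x == 1)).foldl pvRleStep gs) := by
  induction labels generalizing st gs with
  | nil => exact h
  | cons x xs ih =>
    have := pvInv_step st gs x h
    by_cases hx : (x == 0 || x == 1) = true
    · simp only [List.foldl_cons, List.filter_cons, hx, List.foldl_cons]
      exact ih _ _ (by simpa [hx] using this)
    · simp only [List.foldl_cons, List.filter_cons, hx]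
      exact ih _ _ (by simpa [hx] using this)

theorem pv_dropLast_reverse {α : Type} (l : List α) :
    l.reverse.dropLast = l.tail.reverse := by
  cases l with
  | nil => rfl
  | cons a t => simp

-- extraction: the invariant at the end of both folds yields equal results
theorem pv_extract (st : Int × List Int × Int × Int) (gs : List (Int × Int))
    (h : pvInv st gs) :
    (st.1, st.2.1) =
      ((((gs.reverse.filter (fun p => p.1 == 0)).length : Int),
        (gs.reverse.dropLast.filter (fun p => p.1 == 0)).map Prod.snd)) := by
  obtain ⟨hc, hcase⟩ := h
  refine Prod.ext ?_ ?_
  · simpa [List.filter_reverse] using hc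
  · rcases hcase with ⟨_, hhd, hsz⟩ | ⟨_, rest, hgseq, hsz⟩
    · -- last group (if any) is a 1-group: dropping it drops no zero group
      simp only [pv_dropLast_reverse]
      cases gs with
      | nil => simpa using hsz
      | cons p rest =>
        have hp1 : p.1 = 1 := hhd p rfl
        have hfe : List.filter (fun p => p.1 == 0) (p :: rest) =
            rest.filter (fun p => p.1 == 0) := by
          simp [hp1]
        rw [hfe] at hsz
        simp only [List.tail_cons, List.filter_reverse, List.map_reverse]
        simpa [List.map_reverse] using hsz
    · -- last group is the open zero segment: its size was never appended
      subst hgseq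
      simp only [pv_dropLast_reverse, List.tail_cons, List.filter_reverse, List.map_reverse]
      simpa [List.map_reverse] using hsz

-- ===== VERDICT (by name: the statement is the Claim_ definition above) =====
theorem get_number_of_segments_spec : Claim_equal_get_number_of_segments := by
  intro labels _
  have h0 : pvInv ((0 : Int), ([] : List Int), (1 : Int), (0 : Int)) [] := by
    refine ⟨by simp, Or.inl ⟨rfl, by simp, by simp⟩⟩
  exact pv_extract _ _ (pvInv_foldl labels _ _ h0)
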